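-- pv_equiv track=rewrite | github.com/hyo-jae-jung/beakjoon | solved/9037.py | solution
-- ===== SOURCE A (Python) =====
-- from collections import deque
--
-- def solution(tmp:list) -> list:
--     tmp2 = deque([])
--     for i in range(len(tmp)):
--         tmp2.append(tmp[i]//2)
--         tmp[i] = tmp[i]//2
--     t = tmp2.pop()
--     tmp2.appendleft(t)
--     return [i+j for i,j in zip(tmp,tmp2)]
-- ===== SOURCE B (Python) =====
-- def solution(tmp: list) -> list:
--     prev = tmp[-1] // 2
--     res = []
--     for i in range(len(tmp)):
--         cur = tmp[i] // 2
--         tmp[i] = cur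
--         res.append(cur + prev)
--         prev = cur
--     return res
-- ===== Notes on version B (the rewrite author's own statement) =====
-- stated objective: simpler
-- what changed: Replaces the deque, the pop/appendleft rotation and the zip comprehension by one pass that carries the wrap-around predecessor half (seeded from tmp[-1]//2) and emits cur+prev directly.
import Mathlib
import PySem

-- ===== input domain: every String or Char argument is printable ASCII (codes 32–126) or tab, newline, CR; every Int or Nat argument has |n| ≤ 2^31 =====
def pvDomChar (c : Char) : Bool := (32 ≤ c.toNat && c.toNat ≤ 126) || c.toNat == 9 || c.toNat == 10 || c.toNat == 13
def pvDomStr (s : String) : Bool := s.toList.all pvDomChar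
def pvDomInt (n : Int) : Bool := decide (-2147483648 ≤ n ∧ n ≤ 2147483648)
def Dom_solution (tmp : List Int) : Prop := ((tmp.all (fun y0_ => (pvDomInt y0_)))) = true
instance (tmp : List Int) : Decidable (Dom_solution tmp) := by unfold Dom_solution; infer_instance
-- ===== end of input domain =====

-- B replaces A's deque + pop/appendleft rotation + zip comprehension by one pass carrying the
-- wrap-around predecessor half (simpler, same O(n)); both Pythons also halve the argument list
-- in place identically — the theorem below is about the return value.


-- ===== PORT A =====
def solution (tmp : List Int) : List Int :=
  let st := (PySem.List.pyRange 0 (tmp.length : Int) 1).foldl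
    (fun (s : List Int × List Int) i =>
      let h := PySem.Int.floordiv (PySem.List.pyGetD s.1 i 0) 2
      (PySem.List.pySetD s.1 i h, s.2 ++ [h]))
    (tmp, [])
  match st.2.getLast? with
  | none => []           -- tmp2.pop() raises IndexError on []: excluded by Pre_solution
  | some t => List.zipWith (· + ·) st.1 (t :: st.2.dropLast)

-- ===== PORT B =====
def solutionAltLoop (prev : Int) (xs : List Int) : List Int :=
  match xs with
  | [] => []
  | x :: rest =>
    let cur := PySem.Int.floordiv x 2
    (cur + prev) :: solutionAltLoop cur rest

def solution_alt (tmp : List Int) : List Int :=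
  match PySem.List.pyGet? tmp (-1) with
  | none => []           -- tmp[-1] raises IndexError on []: excluded by Pre_solution
  | some last => solutionAltLoop (PySem.Int.floordiv last 2) tmp

-- ===== PRECONDITION & SPEC =====
-- Pre_ excludes only the empty list, on which A raises IndexError (pop from an empty deque); B raises there too (tmp[-1]).
def Pre_solution (tmp : List Int) : Prop := tmp ≠ []
instance (tmp : List Int) : Decidable (Pre_solution tmp) := by unfold Pre_solution; infer_instance
def pvWitness_solution : List Int := [7, -3, 4]

def Spec_solution (tmp : List Int) (out : List Int) : Prop := out = solution_alt tmp
instance (tmp : List Int) (out : List Int) : Decidable (Spec_solution tmp out) := by unfold Spec_solution; infer_instance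

-- ===== CLAIM (what is proved, stated in full; the proofs are below) =====
def Claim_equal_solution : Prop := ∀ (tmp : List Int), Dom_solution tmp → Pre_solution tmp → Spec_solution tmp (solution tmp)

-- ===== LEMMAS AND PROOFS =====

-- invariant of A's loop: after the first k indices, the first k entries of tmp are halved
-- and tmp2 holds exactly those k halves
theorem solution_fold_inv (tmp : List Int) (k : Nat) (hk : k ≤ tmp.length) :
    ((List.range k).map (Int.ofNat)).foldl
      (fun (s : List Int × List Int) i =>
        let h := PySem.Int.floordiv (PySem.List.pyGetD s.1 i 0) 2
        (PySem.List.pySetD s.1 i h, s.2 ++ [h]))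
      (tmp, []) =
    ((tmp.take k).map (fun x => PySem.Int.floordiv x 2) ++ tmp.drop k,
     (tmp.take k).map (fun x => PySem.Int.floordiv x 2)) := by
  induction k with
  | zero => simp
  | succ k ih =>
    have hklt : k < tmp.length := hk
    have hlen : ((tmp.take k).map (fun x => PySem.Int.floordiv x 2)).length = k := by
      simp [Nat.le_of_lt hklt]
    rw [List.range_succ, List.map_append, List.foldl_append, ih (Nat.le_of_lt hklt)]
    simp only [List.map_cons, List.map_nil, List.foldl_cons, List.foldl_nil, Int.ofNat_eq_natCast]
    have hget : PySem.List.pyGetD ((tmp.take k).map (fun x => PySem.Int.floordiv x 2) ++ tmp.drop k) (k : Int) 0 = tmp[k] := by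
      rw [PySem.List.pyGetD_natCast]
      rw [List.getD_eq_getElem?_getD, List.getElem?_append_right (by omega)]
      simp [Nat.min_eq_left (Nat.le_of_lt hklt), List.getElem?_eq_getElem hklt]
    rw [PySem.List.pySetD_natCast, hget]
    rw [List.set_append_right _ _ (by omega), hlen, Nat.sub_self]
    have hdrop : (List.drop k tmp).set 0 (PySem.Int.floordiv tmp[k] 2)
        = PySem.Int.floordiv tmp[k] 2 :: List.drop (k+1) tmp := by
      conv_lhs => rw [List.drop_eq_getElem_cons hklt]
      rw [List.set_cons_zero]
    rw [hdrop, List.take_succ_eq_append_getElem hklt, List.map_append]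
    simp

-- B's single pass produces exactly the halves zipped with their rotated-by-one predecessors
theorem solutionAltLoop_eq (xs : List Int) (p : Int) :
    solutionAltLoop p xs =
      List.zipWith (· + ·) (xs.map (fun x => PySem.Int.floordiv x 2))
        (p :: (xs.map (fun x => PySem.Int.floordiv x 2)).dropLast) := by
  induction xs generalizing p with
  | nil => simp [solutionAltLoop]
  | cons x rest ih =>
    cases rest with
    | nil => simp [solutionAltLoop]
    | cons y t =>
      rw [show solutionAltLoop p (x :: y :: t)
            = (PySem.Int.floordiv x 2 + p) :: solutionAltLoop (PySem.Int.floordiv x 2) (y :: t) from rfl,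
          ih (PySem.Int.floordiv x 2)]
      simp only [List.map_cons, List.dropLast_cons₂, List.zipWith_cons_cons]

theorem solution_eq_alt (tmp : List Int) (hpre : tmp ≠ []) : solution tmp = solution_alt tmp := by
  have hrange : PySem.List.pyRange 0 (tmp.length : Int) 1 = (List.range tmp.length).map Int.ofNat := by
    rw [PySem.List.pyRange_zero_natCast]
    rfl
  have hlast : tmp.getLast? = some (tmp.getLast hpre) := List.getLast?_eq_some_getLast hpre
  have hmaplast : (tmp.map (fun x => PySem.Int.floordiv x 2)).getLast?
      = some (PySem.Int.floordiv (tmp.getLast hpre) 2) := by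
    rw [List.getLast?_map, hlast, Option.map_some]
  unfold solution solution_alt
  rw [hrange, solution_fold_inv tmp tmp.length le_rfl]
  simp only [List.take_length, List.drop_length, List.append_nil, hmaplast,
    PySem.List.pyGet?_neg_one, hlast]
  rw [solutionAltLoop_eq]

-- ===== VERDICT (by name: the statement is the Claim_ definition above) =====
theorem solution_spec : Claim_equal_solution := by
  intro tmp _ hpre
  unfold Spec_solution
  exact solution_eq_alt tmp hpre
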